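-- pv_equiv track=rewrite | github.com/mark1ry/AoC-25 | day_03/joltage.py | find_best_digit
-- ===== SOURCE A (Python) =====
-- def find_best_digit(sequence: str) -> list:
--
--     temp = "0"
--     temp_idx = 0
--     for index, digit in enumerate(sequence):
--         if int(digit)>int(temp):
--             temp = digit
--             temp_idx = index
--
--     return temp, temp_idx
-- ===== SOURCE B (Python) =====
-- def find_best_digit(sequence: str) -> list:
--     if not sequence:
--         return "0", 0
--     best = max(sequence, key=int)
--     return best, sequence.index(best)
-- ===== Notes on version B (the rewrite author's own statement) =====
-- stated objective: simpler
-- what changed: Replaces the manual scan-and-track loop with max(sequence, key=int) (first maximal element = A's strict-improvement tie rule) followed by sequence.index(best); the empty string keeps A's baseline ("0", 0).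
import Mathlib
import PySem

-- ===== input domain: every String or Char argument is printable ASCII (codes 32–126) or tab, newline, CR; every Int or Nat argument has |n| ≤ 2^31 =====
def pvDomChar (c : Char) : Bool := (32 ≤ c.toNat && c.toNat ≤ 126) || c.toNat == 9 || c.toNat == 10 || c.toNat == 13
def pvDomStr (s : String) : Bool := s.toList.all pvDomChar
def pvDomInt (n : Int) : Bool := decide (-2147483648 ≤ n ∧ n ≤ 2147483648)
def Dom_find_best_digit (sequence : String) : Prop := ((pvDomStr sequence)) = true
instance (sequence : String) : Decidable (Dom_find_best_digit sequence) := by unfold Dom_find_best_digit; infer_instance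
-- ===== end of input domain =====

-- B replaces A's scan-and-track loop by max(sequence, key=int) followed by sequence.index(best): simpler, same O(n) cost.

-- ===== PORT A =====
-- int(s) is PySem.Int.ofStr?; .getD 0 is total glue — Pre_ excludes the ValueError inputs,
-- and on digit-only inputs ofStr? is always `some`.
def find_best_digit (sequence : String) : String × Int :=
  (PySem.List.enumerate sequence.toList 0).foldl
    (fun st p =>
      if (PySem.Int.ofStr? (String.ofList [p.2])).getD 0 > (PySem.Int.ofStr? st.1).getD 0
      then (String.ofList [p.2], p.1) else st)
    ("0", 0)

-- ===== PORT B =====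
-- max(sequence, key=int) is PySem.List.max? (first maximal element); the `none` branch is
-- unreachable (the empty string is guarded); sequence.index(best) is PySem.List.index? —
-- best is a member, so `.getD 0` never fires.
def find_best_digit_alt (sequence : String) : String × Int :=
  if sequence.toList = [] then ("0", 0)
  else
    match PySem.List.max? sequence.toList
        (fun c => (PySem.Int.ofStr? (String.ofList [c])).getD 0) with
    | some best => (String.ofList [best], ((PySem.List.index? sequence.toList best).getD 0 : Nat))
    | none => ("0", 0)

-- ===== PRECONDITION & SPEC =====
-- Pre_: the Python A calls int(digit) on every character, raising ValueError on any
-- non-digit character; exactly the digit-only strings (including the empty string) return.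
def Pre_find_best_digit (sequence : String) : Prop := sequence.toList.all Char.isDigit = true
instance (sequence : String) : Decidable (Pre_find_best_digit sequence) := by unfold Pre_find_best_digit; infer_instance
def pvWitness_find_best_digit : String := "1907"

def Spec_find_best_digit (sequence : String) (out : String × Int) : Prop := out = find_best_digit_alt sequence
instance (sequence : String) (out : String × Int) : Decidable (Spec_find_best_digit sequence out) := by unfold Spec_find_best_digit; infer_instance

-- ===== CLAIM (what is proved, stated in full; the proofs are below) =====
def Claim_equal_find_best_digit : Prop := ∀ (sequence : String), Dom_find_best_digit sequence → Pre_find_best_digit sequence → Spec_find_best_digit sequence (find_best_digit sequence)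

-- ===== LEMMAS AND PROOFS =====

-- the key both ports apply to a character: int(c) with the total glue
def pvK (c : Char) : Int := (PySem.Int.ofStr? (String.ofList [c])).getD 0

-- A's loop body
def pvStep (st : String × Int) (p : Int × Char) : String × Int :=
  if (PySem.Int.ofStr? (String.ofList [p.2])).getD 0 > (PySem.Int.ofStr? st.1).getD 0
  then (String.ofList [p.2], p.1) else st

-- running first-maximum with seed m (the foldl inside PySem.List.max?, seeded)
def pvBest (m : Char) (l : List Char) : Char :=
  l.foldl (fun a c => if pvK a < pvK c then c else a) m

theorem pvBest_nil (m : Char) : pvBest m [] = m := rfl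

theorem pvBest_cons (m c : Char) (l : List Char) :
    pvBest m (c :: l) = pvBest (if pvK m < pvK c then c else m) l := rfl

theorem max?_cons_cons (c d : Char) (t : List Char) :
    PySem.List.max? (c :: d :: t) pvK = PySem.List.max? ((if pvK c < pvK d then d else c) :: t) pvK := by
  simp only [PySem.List.max?, List.foldl_cons]
  by_cases h : pvK c < pvK d <;> simp [h]

theorem max?_eq_pvBest (l : List Char) : ∀ (c : Char),
    PySem.List.max? (c :: l) pvK = some (pvBest c l) := by
  induction l with
  | nil => intro c; rfl
  | cons d t ih =>
      intro c
      rw [max?_cons_cons, ih, pvBest_cons]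

theorem pvK_le_pvBest (m : Char) (l : List Char) : pvK m ≤ pvK (pvBest m l) := by
  induction l generalizing m with
  | nil => simp [pvBest_nil]
  | cons c t ih =>
      rw [pvBest_cons]
      by_cases h : pvK m < pvK c
      · rw [if_pos h]; exact le_of_lt (lt_of_lt_of_le h (ih c))
      · rw [if_neg h]; exact ih m

theorem pvBest_eq_or_mem (m : Char) (l : List Char) :
    pvBest m l = m ∨ pvBest m l ∈ l := by
  induction l generalizing m with
  | nil => exact Or.inl rfl
  | cons c t ih =>
      rw [pvBest_cons]
      by_cases h : pvK m < pvK c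
      · rw [if_pos h]
        rcases ih c with h' | h'
        · exact Or.inr (by simp [h'])
        · exact Or.inr (List.mem_cons_of_mem _ h')
      · rw [if_neg h]
        rcases ih m with h' | h'
        · exact Or.inl h'
        · exact Or.inr (List.mem_cons_of_mem _ h')

theorem pvBest_eq_or_lt (m : Char) (l : List Char) :
    pvBest m l = m ∨ pvK m < pvK (pvBest m l) := by
  induction l generalizing m with
  | nil => exact Or.inl rfl
  | cons c t ih =>
      rw [pvBest_cons]
      by_cases h : pvK m < pvK c
      · rw [if_pos h]
        rcases ih c with h' | h'
        · exact Or.inr (by rw [h']; exact h)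
        · exact Or.inr (lt_trans h h')
      · rw [if_neg h]; exact ih m

-- characterization of A's loop, fully generic in the key
theorem loopA (l : List Char) (t : Char) (i s : Int) :
    (PySem.List.enumerate l s).foldl pvStep (String.ofList [t], i) =
      if pvK t < pvK (pvBest t l)
      then (String.ofList [pvBest t l],
            s + (((PySem.List.index? l (pvBest t l)).getD 0 : Nat) : Int))
      else (String.ofList [t], i) := by
  induction l generalizing t i s with
  | nil => simp [PySem.List.enumerate_nil, pvBest_nil]
  | cons c rest ih =>
      rw [PySem.List.enumerate_cons, List.foldl_cons]
      have hstep : pvStep (String.ofList [t], i) (s, c) =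
          if pvK t < pvK c then (String.ofList [c], s) else (String.ofList [t], i) := by
        simp only [pvStep, pvK, gt_iff_lt]
        rfl
      rw [hstep, pvBest_cons]
      by_cases hc : pvK t < pvK c
      · rw [if_pos hc, if_pos hc, ih]
        have hle : pvK t < pvK (pvBest c rest) := lt_of_lt_of_le hc (pvK_le_pvBest c rest)
        rw [if_pos hle]
        rcases pvBest_eq_or_lt c rest with hb | hb
        · -- nothing in rest beats c: best is c, at the head
          rw [hb] at hle ⊢
          rw [if_neg (lt_irrefl _), PySem.List.index?_cons_self]
          simp
        · -- best is inside rest, strictly beating c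
          rw [if_pos hb]
          have hne : c ≠ pvBest c rest := by
            intro h; rw [← h] at hb; exact lt_irrefl _ hb
          have hmem : pvBest c rest ∈ rest := by
            rcases pvBest_eq_or_mem c rest with h' | h'
            · exact absurd h'.symm hne
            · exact h'
          obtain ⟨j, hj⟩ := Option.isSome_iff_exists.mp
            ((PySem.List.index?_isSome_iff (xs := rest) (v := pvBest c rest)).mpr hmem)
          rw [PySem.List.index?_cons_of_ne _ hne, hj]
          simp [Option.map_some]
          ring
      · rw [if_neg hc, if_neg hc, ih]
        by_cases ht : pvK t < pvK (pvBest t rest)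
        · rw [if_pos ht, if_pos ht]
          have hne : c ≠ pvBest t rest := by
            intro h; rw [← h] at ht; exact hc ht
          have hmem : pvBest t rest ∈ rest := by
            rcases pvBest_eq_or_mem t rest with h' | h'
            · exact absurd (h' ▸ ht) (lt_irrefl _)
            · exact h'
          obtain ⟨j, hj⟩ := Option.isSome_iff_exists.mp
            ((PySem.List.index?_isSome_iff (xs := rest) (v := pvBest t rest)).mpr hmem)
          rw [PySem.List.index?_cons_of_ne _ hne, hj]
          simp [Option.map_some]
          ring
        · rw [if_neg ht, if_neg ht]

theorem digit_cases (c : Char) (h : c.isDigit = true) :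
    c = '0' ∨ c = '1' ∨ c = '2' ∨ c = '3' ∨ c = '4' ∨ c = '5' ∨ c = '6' ∨ c = '7' ∨ c = '8' ∨ c = '9' := by
  simp [Char.isDigit] at h
  obtain ⟨h1, h2⟩ := h
  have h1' : 48 ≤ c.toNat := UInt32.le_iff_toNat_le.mp h1
  have h2' : c.toNat ≤ 57 := UInt32.le_iff_toNat_le.mp h2
  have key : ∀ (k : Nat), c.toNat = k → c = Char.ofNat k := by
    intro k hk; subst hk; exact (Char.ofNat_toNat c).symm
  interval_cases h3 : c.toNat <;> rw [key _ rfl] <;> decide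

theorem pvK_zero : pvK '0' = 0 := by decide

theorem pvK_le_zero (c : Char) (h : c.isDigit = true) (h2 : pvK c ≤ 0) : c = '0' := by
  rcases digit_cases c h with rfl|rfl|rfl|rfl|rfl|rfl|rfl|rfl|rfl|rfl <;>
    first | rfl | (exfalso; revert h2; decide)

theorem eqA (seq : String) :
    find_best_digit seq = (PySem.List.enumerate seq.toList 0).foldl pvStep ("0", 0) := rfl

theorem eqB (seq : String) (c : Char) (rest : List Char) (h : seq.toList = c :: rest) :
    find_best_digit_alt seq =
      (String.ofList [pvBest c rest],
       (((PySem.List.index? (c :: rest) (pvBest c rest)).getD 0 : Nat) : Int)) := by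
  unfold find_best_digit_alt
  rw [h]
  have hk : (fun c => (PySem.Int.ofStr? (String.ofList [c])).getD 0) = pvK := rfl
  rw [if_neg (by simp), hk, max?_eq_pvBest]

-- ===== VERDICT (by name: the statement is the Claim_ definition above) =====
theorem find_best_digit_spec : Claim_equal_find_best_digit := by
  intro seq _hdom hpre
  show find_best_digit seq = find_best_digit_alt seq
  rcases hl : seq.toList with _ | ⟨c, rest⟩
  · -- empty string: both return ("0", 0)
    rw [eqA, hl]
    unfold find_best_digit_alt
    rw [if_pos hl]
    rfl
  · have hdig : ∀ x ∈ seq.toList, x.isDigit = true := List.all_eq_true.mp hpre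
    rw [hl] at hdig
    have hz : "0" = String.ofList ['0'] := rfl
    rw [eqA, hl, eqB seq c rest hl, hz, loopA]
    rw [pvBest_cons, pvK_zero]
    by_cases h0 : (0 : Int) < pvK c
    · rw [if_pos h0]
      have hlt : (0:Int) < pvK (pvBest c rest) := lt_of_lt_of_le h0 (pvK_le_pvBest c rest)
      rw [if_pos hlt]
      simp
    · have hc0 : c = '0' := pvK_le_zero c (hdig c (List.mem_cons_self)) (not_lt.mp h0)
      subst hc0
      rw [if_neg h0]
      by_cases hb : (0 : Int) < pvK (pvBest '0' rest)
      · rw [if_pos hb]; simp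
      · rw [if_neg hb]
        have hb0 : pvBest '0' rest = '0' := by
          rcases pvBest_eq_or_mem '0' rest with h' | h'
          · exact h'
          · exact pvK_le_zero _ (hdig _ (List.mem_cons_of_mem _ h')) (not_lt.mp hb)
        rw [hb0, PySem.List.index?_cons_self]
        simp
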